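-- pv_equiv track=rewrite | github.com/levimake/customer-support-intent-linguistic-prediction | server/model_old.py | get_language_complexity
-- ===== SOURCE A (Python) =====
-- def get_language_complexity(tags):
--     """Analyzes the complexity of an utterance based on the linguistic tags.
--
--     Args:
--         tags: A list of linguistic tags.
--
--     Returns:
--         A string indicating the complexity of the utterance.
--     """
--
--     complexity = "low"
--     score = 0
--
--     for tag in tags:
--         if tag == "B" :
--             score += 1
--         elif tag == "I" or tag == "C":
--             score += 2
--         elif tag == "M" or tag == "L":
--             score += 3
--         elif tag == "E":
--             score += 4
--
--     if score >= 10: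
--         complexity = "high"
--     elif score >= 4 and score <= 7:
--         complexity = "medium"
--     else:
--         complexity = "low"
--
--     return complexity, score
-- ===== SOURCE B (Python) =====
-- _W = {"B": 1, "I": 2, "C": 2, "M": 3, "L": 3, "E": 4}
--
-- def _score(ts):
--     n = len(ts)
--     if n == 0:
--         return 0
--     if n == 1:
--         return _W.get(ts[0], 0)
--     m = n // 2
--     return _score(ts[:m]) + _score(ts[m:])
--
-- def get_language_complexity(tags):
--     score = _score(tags)
--     complexity = "high" if score >= 10 else ("medium" if 4 <= score <= 7 else "low")
--     return complexity, score
-- ===== Notes on version B (the rewrite author's own statement) =====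
-- stated objective: alternative
-- what changed: Replaced the per-tag branching accumulator loop by a divide-and-conquer recursion: the list is split in halves down to singletons whose weight comes from a lookup table, and the partial scores are summed on the way back up; classification is a single conditional expression.
import Mathlib
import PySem

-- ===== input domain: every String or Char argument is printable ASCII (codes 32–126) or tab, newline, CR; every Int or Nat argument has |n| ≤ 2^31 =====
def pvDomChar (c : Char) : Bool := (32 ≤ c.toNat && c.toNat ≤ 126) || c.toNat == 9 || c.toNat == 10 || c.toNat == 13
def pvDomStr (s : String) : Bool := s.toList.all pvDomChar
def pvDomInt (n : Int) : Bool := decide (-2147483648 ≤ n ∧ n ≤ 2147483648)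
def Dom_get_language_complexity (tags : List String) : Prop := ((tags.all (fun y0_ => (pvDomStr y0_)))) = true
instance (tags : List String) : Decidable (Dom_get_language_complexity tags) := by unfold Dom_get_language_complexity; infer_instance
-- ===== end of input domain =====

-- B replaces A's per-tag branching loop by divide-and-conquer on list halves with a weight-table lookup at singletons (alternative decomposition); classification unchanged.


-- ===== PORT A =====
def get_language_complexity (tags : List String) : String × Int :=
  let score : Int := tags.foldl (fun score tag =>
    if tag == "B" then score + 1
    else if tag == "I" || tag == "C" then score + 2
    else if tag == "M" || tag == "L" then score + 3
    else if tag == "E" then score + 4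
    else score) 0
  let complexity : String :=
    if score ≥ 10 then "high"
    else if score ≥ 4 ∧ score ≤ 7 then "medium"
    else "low"
  (complexity, score)

-- ===== PORT B =====
-- the weight table _W, ported as a PySem.Dict (association list); _W.get(t, 0) = getD
def pvWTable : PySem.Dict String Int :=
  PySem.Dict.ofList [("B", 1), ("I", 2), ("C", 2), ("M", 3), ("L", 3), ("E", 4)]

-- _score: divide-and-conquer on slices; ts[:m]/ts[m:] ported as take/drop at m = n // 2
def pvScore (ts : List String) : Int :=
  if ts.length = 0 then 0
  else if ts.length = 1 then PySem.Dict.getD pvWTable (ts.headD "") 0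
  else
    pvScore (ts.take (ts.length / 2)) + pvScore (ts.drop (ts.length / 2))
termination_by ts.length
decreasing_by
  · simp only [List.length_take]; omega
  · simp only [List.length_drop]; omega

def get_language_complexity_alt (tags : List String) : String × Int :=
  let score : Int := pvScore tags
  let complexity : String :=
    if score ≥ 10 then "high"
    else if 4 ≤ score ∧ score ≤ 7 then "medium"
    else "low"
  (complexity, score)

-- ===== PRECONDITION & SPEC =====
def Spec_get_language_complexity (tags : List String) (out : String × Int) : Prop := out = get_language_complexity_alt tags
instance (tags : List String) (out : String × Int) : Decidable (Spec_get_language_complexity tags out) := by unfold Spec_get_language_complexity; infer_instance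

-- ===== CLAIM (what is proved, stated in full; the proofs are below) =====
def Claim_equal_get_language_complexity : Prop := ∀ (tags : List String), Dom_get_language_complexity tags → Spec_get_language_complexity tags (get_language_complexity tags)

-- ===== LEMMAS AND PROOFS =====

-- the weight table read out: _W.get(t, 0) as a six-way case split
theorem pvW_spec (t : String) :
    PySem.Dict.getD pvWTable t 0 =
      (if t = "B" then (1 : Int) else if t = "I" ∨ t = "C" then 2
       else if t = "M" ∨ t = "L" then 3 else if t = "E" then 4 else 0) := by
  by_cases hB : t = "B"
  · subst hB; decide
  by_cases hI : t = "I"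
  · subst hI; decide
  by_cases hC : t = "C"
  · subst hC; decide
  by_cases hM : t = "M"
  · subst hM; decide
  by_cases hL : t = "L"
  · subst hL; decide
  by_cases hE : t = "E"
  · subst hE; decide
  have hk : pvWTable.keys = ["B", "I", "C", "M", "L", "E"] := by decide
  have h0 : pvWTable.get? t = none := by
    rw [PySem.Dict.get?_eq_none_iff_not_mem_keys, hk]
    simp [hB, hI, hC, hM, hL, hE]
  rw [PySem.Dict.getD_eq_get?_getD, h0]
  simp [hB, hI, hC, hM, hL, hE]

-- the divide-and-conquer score is the sum of the per-tag weights (splitting is sum-associative)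
theorem pvScore_eq_sum (ts : List String) :
    pvScore ts = (ts.map (fun t => PySem.Dict.getD pvWTable t 0)).sum := by
  induction hn : ts.length using Nat.strong_induction_on generalizing ts with
  | _ n ih =>
    rw [pvScore]
    subst hn
    match ts with
    | [] => simp
    | [t] => simp
    | t₁ :: t₂ :: rest =>
      rw [if_neg (by simp), if_neg (by simp)]
      rw [ih _ (by simp [List.length_take]; omega) _ rfl,
          ih _ (by simp; omega) _ rfl,
          ← List.sum_append, ← List.map_append, List.take_append_drop]

-- A's branching loop also accumulates the sum of the per-tag weights
theorem foldl_eq_sum (ts : List String) (s : Int) :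
    ts.foldl (fun score tag =>
      if tag == "B" then score + 1
      else if tag == "I" || tag == "C" then score + 2
      else if tag == "M" || tag == "L" then score + 3
      else if tag == "E" then score + 4
      else score) s
    = s + (ts.map (fun t => PySem.Dict.getD pvWTable t 0)).sum := by
  induction ts generalizing s with
  | nil => simp
  | cons t rest ih =>
    simp only [List.foldl_cons, List.map_cons, List.sum_cons, ih]
    have : (if t == "B" then s + 1
      else if t == "I" || t == "C" then s + 2
      else if t == "M" || t == "L" then s + 3
      else if t == "E" then s + 4
      else s) = s + PySem.Dict.getD pvWTable t 0 := by
      rw [pvW_spec]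
      simp only [beq_iff_eq, Bool.or_eq_true]
      split_ifs <;> ring
    rw [this]; ring

-- ===== VERDICT (by name: the statement is the Claim_ definition above) =====
theorem get_language_complexity_spec : Claim_equal_get_language_complexity := by
  intro tags _
  unfold Spec_get_language_complexity get_language_complexity get_language_complexity_alt
  rw [pvScore_eq_sum, foldl_eq_sum]
  norm_num
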